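-- pv_equiv track=rewrite | github.com/fyhuang/makeblog | makeblog/utils.py | first_posts
-- ===== SOURCE A (Python) =====
-- def first_posts(posts, maxnum):
--     count = 0
--     last_ix = 0
--     last_pt = ''
--     for (pt,p) in posts:
--         last_ix += 1
--         if not (pt == 'twitter' and last_pt == 'twitter'):
--             count += 1
--             if count >= maxnum:
--                 break
--         last_pt = pt
--
--     return posts[:last_ix]
-- ===== SOURCE B (Python) =====
-- def first_posts(posts, maxnum):
--     # Multi-pass pipeline: per-item "counts" flags, cumulative counts, then cut at
--     # the first position whose cumulative count reaches maxnum (else keep all).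
--     types = [pt for pt, _ in posts]
--     flags = [t != 'twitter' or prev != 'twitter'
--              for prev, t in zip([''] + types, types)]
--     cums = []
--     s = 0
--     for f in flags:
--         s += f
--         cums.append(s)
--     cut = next((i + 1 for i, c in enumerate(cums) if c >= maxnum), len(posts))
--     return posts[:cut]
-- ===== Notes on version B (the rewrite author's own statement) =====
-- stated objective: alternative
-- what changed: Replaced A's single stateful loop with break (count/last_ix/last_pt state) by a multi-pass pipeline: extract types, compute per-item 'counts' flags by zipping with the shifted type list, build cumulative counts, then cut at the first index whose cumulative count reaches maxnum (keeping all posts if never reached).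
import Mathlib
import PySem

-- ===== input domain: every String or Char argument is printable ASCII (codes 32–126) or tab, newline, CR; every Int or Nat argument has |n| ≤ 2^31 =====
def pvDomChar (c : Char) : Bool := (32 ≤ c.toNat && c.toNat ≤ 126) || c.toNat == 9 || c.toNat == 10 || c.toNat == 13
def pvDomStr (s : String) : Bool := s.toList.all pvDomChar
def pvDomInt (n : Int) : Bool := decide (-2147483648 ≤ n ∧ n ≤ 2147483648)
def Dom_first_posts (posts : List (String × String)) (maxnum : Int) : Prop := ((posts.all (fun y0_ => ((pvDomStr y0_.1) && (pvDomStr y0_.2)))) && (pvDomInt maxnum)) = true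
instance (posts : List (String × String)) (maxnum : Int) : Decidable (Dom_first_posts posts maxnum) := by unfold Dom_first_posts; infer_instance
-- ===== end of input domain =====

-- B replaces A's single stateful break-loop by a multi-pass pipeline (per-item
-- "counts" flags, cumulative counts, cut at first index reaching maxnum);
-- objective: alternative decomposition, same cost.

-- ===== PORT A =====
-- the for-loop of A: state (count, last_ix, last_pt); returns the final last_ix
def firstPostsLoop (maxnum : Int) : List (String × String) → Int → Int → String → Int
  | [], _, last_ix, _ => last_ix
  | (pt, _) :: rest, count, last_ix, last_pt =>
    let last_ix' := last_ix + 1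
    if !(pt == "twitter" && last_pt == "twitter") then
      let count' := count + 1
      if maxnum ≤ count' then last_ix'          -- count >= maxnum: break
      else firstPostsLoop maxnum rest count' last_ix' pt
    else firstPostsLoop maxnum rest count last_ix' pt

def first_posts (posts : List (String × String)) (maxnum : Int) : List (String × String) :=
  PySem.List.slice posts none (some (firstPostsLoop maxnum posts 0 0 ""))

-- ===== PORT B =====
-- flags = [t != 'twitter' or prev != 'twitter' for prev, t in zip([''] + types, types)]
def altFlags (types : List String) : List Bool :=
  (("" :: types).zip types).map (fun pr => pr.2 != "twitter" || pr.1 != "twitter")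

-- the cums-building loop: s starts at 0, cums.append(s + flag)
def altCums (flags : List Bool) : List Int :=
  (flags.foldl (fun st f =>
      (st.1 + (if f then 1 else 0), st.2 ++ [st.1 + (if f then 1 else 0)]))
    ((0 : Int), ([] : List Int))).2

def first_posts_alt (posts : List (String × String)) (maxnum : Int) : List (String × String) :=
  let types := posts.map Prod.fst
  let cums := altCums (altFlags types)
  -- next((i + 1 for i, c in enumerate(cums) if c >= maxnum), len(posts))
  let cut : Nat := match cums.findIdx? (fun c => decide (maxnum ≤ c)) with
    | some i => i + 1
    | none => posts.length
  posts.take cut      -- posts[:cut], cut a nonnegative index: exactly List.take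

-- ===== PRECONDITION & SPEC =====
def Spec_first_posts (posts : List (String × String)) (maxnum : Int) (out : List (String × String)) : Prop := out = first_posts_alt posts maxnum
instance (posts : List (String × String)) (maxnum : Int) (out : List (String × String)) : Decidable (Spec_first_posts posts maxnum out) := by unfold Spec_first_posts; infer_instance

-- ===== CLAIM (what is proved, stated in full; the proofs are below) =====
def Claim_equal_first_posts : Prop := ∀ (posts : List (String × String)) (maxnum : Int), Dom_first_posts posts maxnum → Spec_first_posts posts maxnum (first_posts posts maxnum)

-- ===== LEMMAS AND PROOFS =====

-- common reference function: number of items kept, walking the type list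
def cutG (mn : Int) : String → List String → Nat
  | _, [] => 0
  | prev, t :: ts =>
    if t = "twitter" ∧ prev = "twitter" then 1 + cutG mn t ts
    else if mn ≤ 1 then 1
    else 1 + cutG (mn - 1) t ts

theorem loopA_eq_cutG (mn : Int) (ps : List (String × String)) :
    ∀ (count ix : Int) (prev : String),
    firstPostsLoop mn ps count ix prev = ix + (cutG (mn - count) prev (ps.map Prod.fst) : Nat) := by
  induction ps with
  | nil => intro count ix prev; simp [firstPostsLoop, cutG]
  | cons hd tl ih =>
    intro count ix prev
    obtain ⟨pt, p⟩ := hd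
    by_cases hc : pt = "twitter" ∧ prev = "twitter"
    · have hb : (pt == "twitter" && prev == "twitter") = true := by simp [hc.1, hc.2]
      simp only [firstPostsLoop, hb, Bool.not_true, Bool.false_eq_true, if_false,
        List.map_cons, cutG, if_pos hc, ih]
      push_cast
      ring
    · have hb : (pt == "twitter" && prev == "twitter") = false := by
        rcases (not_and_or.mp hc) with h | h <;> simp [h]
      simp only [firstPostsLoop, hb, Bool.not_false, if_true, List.map_cons,
        cutG, if_neg hc]
      by_cases hm : mn ≤ count + 1
      · rw [if_pos hm, if_pos (by omega : mn - count ≤ 1)]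
        simp
      · rw [if_neg hm, if_neg (by omega : ¬ mn - count ≤ 1), ih]
        have h1 : mn - count - 1 = mn - (count + 1) := by ring
        rw [h1]
        push_cast
        ring

-- scan form of altCums
def cumsAux (s : Int) : List Bool → List Int
  | [] => []
  | f :: fs => (s + if f then 1 else 0) :: cumsAux (s + if f then 1 else 0) fs

theorem altCums_foldl (flags : List Bool) :
    ∀ (s : Int) (acc : List Int),
    (flags.foldl (fun st f =>
      (st.1 + (if f then 1 else 0), st.2 ++ [st.1 + (if f then 1 else 0)])) (s, acc)).2
      = acc ++ cumsAux s flags := by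
  induction flags with
  | nil => intro s acc; simp [cumsAux]
  | cons f fs ih => intro s acc; simp [List.foldl_cons, cumsAux, ih]

theorem altCums_eq (flags : List Bool) : altCums flags = cumsAux 0 flags := by
  simpa using altCums_foldl flags 0 []

-- altFlags generalized over the initial predecessor
def flagsP (prev : String) (ts : List String) : List Bool :=
  ((prev :: ts).zip ts).map (fun pr => pr.2 != "twitter" || pr.1 != "twitter")

theorem altFlags_eq (ts : List String) : altFlags ts = flagsP "" ts := rfl

theorem flagsP_cons (prev t : String) (ts : List String) :
    flagsP prev (t :: ts) = ((t != "twitter" || prev != "twitter") :: flagsP t ts) := by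
  simp [flagsP]

-- the cut-selection expression of the pipeline
def cutOf (mn : Int) (n : Nat) (cums : List Int) : Nat :=
  match cums.findIdx? (fun c => decide (mn ≤ c)) with
  | some i => i + 1
  | none => n

theorem cutOf_cons (mn c : Int) (n : Nat) (cs : List Int) :
    cutOf mn (n + 1) (c :: cs) = if mn ≤ c then 1 else 1 + cutOf mn n cs := by
  simp only [cutOf, List.findIdx?_cons]
  by_cases h : mn ≤ c
  · simp [h]
  · simp only [h, decide_false, Bool.false_eq_true, if_false]
    cases cs.findIdx? (fun c => decide (mn ≤ c)) <;> simp <;> omega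

-- the pipeline's cut equals cutG, for any running sum strictly below the threshold
theorem pipe_eq_cutG (mn : Int) (ts : List String) :
    ∀ (prev : String) (s : Int), s < mn →
    cutOf mn ts.length (cumsAux s (flagsP prev ts)) = cutG (mn - s) prev ts := by
  induction ts with
  | nil => intro prev s _; simp [flagsP, cumsAux, cutOf, cutG]
  | cons t ts ih =>
    intro prev s hs
    rw [flagsP_cons]
    by_cases hc : t = "twitter" ∧ prev = "twitter"
    · have hf : (t != "twitter" || prev != "twitter") = false := by simp [hc.1, hc.2]
      simp only [hf, cumsAux, Bool.false_eq_true, if_false, add_zero, List.length_cons]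
      rw [cutOf_cons, if_neg (by omega : ¬ mn ≤ s), ih t s hs]
      simp only [cutG, if_pos hc]
    · have hf : (t != "twitter" || prev != "twitter") = true := by
        rcases (not_and_or.mp hc) with h | h <;> simp [h]
      simp only [hf, cumsAux, if_true, List.length_cons]
      rw [cutOf_cons]
      by_cases hm : mn ≤ s + 1
      · rw [if_pos hm]
        simp only [cutG, if_neg hc]
        rw [if_pos (by omega : mn - s ≤ 1)]
      · rw [if_neg hm, ih t (s + 1) (by omega)]
        simp only [cutG, if_neg hc]
        rw [if_neg (by omega : ¬ mn - s ≤ 1)]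
        congr 1
        have : mn - (s + 1) = mn - s - 1 := by ring
        rw [this]

theorem alt_eq_take (posts : List (String × String)) (mn : Int) :
    first_posts_alt posts mn
      = posts.take (cutOf mn posts.length (cumsAux 0 (flagsP "" (posts.map Prod.fst)))) := by
  simp [first_posts_alt, cutOf, altCums_eq, altFlags_eq]

-- ===== VERDICT (by name: the statement is the Claim_ definition above) =====
theorem first_posts_spec : Claim_equal_first_posts := by
  intro posts mn _
  unfold Spec_first_posts
  rw [alt_eq_take]
  rw [show posts.length = (posts.map Prod.fst).length by simp]
  by_cases hm : 0 < mn
  · rw [pipe_eq_cutG mn _ "" 0 hm]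
    simp [first_posts, loopA_eq_cutG, PySem.List.slice_to_natCast]
  · -- maxnum <= 0: A breaks at the first item (which always counts), B cuts at index 1
    cases posts with
    | nil =>
      simp only [first_posts, firstPostsLoop, cutOf, cumsAux, flagsP, List.zip_nil_right,
        List.map_nil, List.findIdx?_nil, List.take_nil]
      rw [PySem.List.slice_to _ (by omega : (0:Int) ≤ 0)]
      simp
    | cons hd tl =>
      obtain ⟨pt, p⟩ := hd
      have hb : (pt == "twitter" && ("" : String) == "twitter") = false := by simp
      have hf : (pt != "twitter" || ("" : String) != "twitter") = true := by simp
      simp only [first_posts, firstPostsLoop, hb, Bool.not_false, if_true, List.map_cons,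
        flagsP_cons, hf, cumsAux, List.length_cons, cutOf_cons]
      rw [if_pos (by omega : mn ≤ (0:Int) + 1), if_pos (by omega : mn ≤ (0:Int) + 1)]
      rw [show (0:Int) + 1 = 1 from rfl, PySem.List.slice_to _ (by omega : (0:Int) ≤ 1)]
      simp
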